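-- pv_equiv track=rewrite | github.com/adityashirodkar1/Chhatra_Mitra | demo.py | findGenre
-- ===== SOURCE A (Python) =====
-- def findGenre(a):
--     gen = ""
--     for ch in a:
--         if ord(ch) in range(97,123) or ord(ch) in range(65,91):
--             gen += ch
--         if ord(ch) == 44:
--             gen += ','
--     return gen.split(",")
-- ===== SOURCE B (Python) =====
-- def findGenre(a):
--     def letters(seg):
--         return "".join(ch for ch in seg if "a" <= ch <= "z" or "A" <= ch <= "Z")
--     return [letters(seg) for seg in a.split(",")]
-- ===== Notes on version B (the rewrite author's own statement) =====
-- stated objective: faster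
-- what changed: B splits the raw input on commas first and then filters each segment down to ASCII letters, the reverse staging of A, which first filters every character into one accumulated string (via repeated concatenation) and then splits that string; the two commute because every comma is preserved by the filter.
import Mathlib
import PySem

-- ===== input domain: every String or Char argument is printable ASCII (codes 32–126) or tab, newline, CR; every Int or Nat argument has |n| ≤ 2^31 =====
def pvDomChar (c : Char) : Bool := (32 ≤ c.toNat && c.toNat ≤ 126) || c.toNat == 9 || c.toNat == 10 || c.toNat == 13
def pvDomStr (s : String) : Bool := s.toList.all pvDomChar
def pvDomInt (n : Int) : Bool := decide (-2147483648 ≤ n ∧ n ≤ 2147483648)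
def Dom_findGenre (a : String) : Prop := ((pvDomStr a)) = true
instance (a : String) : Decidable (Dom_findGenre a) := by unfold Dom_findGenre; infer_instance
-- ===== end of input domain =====

-- B splits the raw input on commas first and then filters each segment to letters — the reverse
-- staging of A (filter everything into one string, then split); same values, similar cost.

-- ===== PORT A =====
def findGenre (a : String) : List String :=
  let gen := a.toList.foldl (fun gen ch =>
    let gen := if (97 ≤ ch.toNat ∧ ch.toNat ≤ 122) ∨ (65 ≤ ch.toNat ∧ ch.toNat ≤ 90)
               then gen ++ [ch] else gen
    if ch.toNat = 44 then gen ++ [','] else gen) ([] : List Char)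
  (PySem.Chars.splitOn gen [',']).map String.mk

-- ===== PORT B =====
def findGenre_alt (a : String) : List String :=
  (PySem.Chars.splitOn a.toList [',']).map (fun seg =>
    String.mk (seg.filter (fun ch =>
      decide ((97 ≤ ch.toNat ∧ ch.toNat ≤ 122) ∨ (65 ≤ ch.toNat ∧ ch.toNat ≤ 90)))))

-- ===== PRECONDITION & SPEC =====
def Spec_findGenre (a : String) (out : List String) : Prop := out = findGenre_alt a
instance (a : String) (out : List String) : Decidable (Spec_findGenre a out) := by unfold Spec_findGenre; infer_instance

-- ===== CLAIM (what is proved, stated in full; the proofs are below) =====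
def Claim_equal_findGenre : Prop := ∀ (a : String), Dom_findGenre a → Spec_findGenre a (findGenre a)

-- ===== LEMMAS AND PROOFS =====

/-- The letter test shared by both ports, as a Bool. -/
def pvIsLetter (c : Char) : Bool :=
  decide ((97 ≤ c.toNat ∧ c.toNat ≤ 122) ∨ (65 ≤ c.toNat ∧ c.toNat ≤ 90))

/-- The characters A's loop appends for the input characters `cs`. -/
def pvKeep : List Char → List Char
  | [] => []
  | c :: cs =>
    (if (97 ≤ c.toNat ∧ c.toNat ≤ 122) ∨ (65 ≤ c.toNat ∧ c.toNat ≤ 90) then [c] else []) ++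
    (if c.toNat = 44 then [','] else []) ++ pvKeep cs

/-- Prepend to the head segment (a lone segment if there is none). -/
def pvModHead (p : List Char) : List (List Char) → List (List Char)
  | [] => [p]
  | h :: t => (p ++ h) :: t

/-- Structural split on ','. -/
def pvSplit : List Char → List (List Char)
  | [] => [[]]
  | c :: cs => if c = ',' then [] :: pvSplit cs else pvModHead [c] (pvSplit cs)

theorem pvSplit_ne_nil (s : List Char) : pvSplit s ≠ [] := by
  induction s with
  | nil => simp [pvSplit]
  | cons c cs ih =>
    simp only [pvSplit]
    split
    · simp
    · cases h : pvSplit cs with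
      | nil => exact absurd h ih
      | cons a t => simp [pvModHead, h]

theorem pvModHead_nil (l : List (List Char)) (h : l ≠ []) : pvModHead [] l = l := by
  cases l with
  | nil => exact absurd rfl h
  | cons a t => simp [pvModHead]

theorem pv_go_eq (fuel : Nat) (l cur : List Char) (acc : List (List Char))
    (h : l.length < fuel) :
    PySem.Chars.splitOn.go [','] fuel l cur acc =
      acc.reverse ++ pvModHead cur.reverse (pvSplit l) := by
  induction fuel generalizing l cur acc with
  | zero => omega
  | succ n ih =>
    cases l with
    | nil =>
      simp [PySem.Chars.splitOn.go, pvSplit, pvModHead]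
    | cons c rest =>
      simp only [PySem.Chars.splitOn.go]
      by_cases hc : c = ','
      · subst hc
        have hpre : [','].isPrefixOf (',' :: rest) = true := by simp [List.isPrefixOf]
        rw [if_pos hpre]
        have hdrop : List.drop [','].length (',' :: rest) = rest := rfl
        simp only [List.length_cons] at h
        rw [hdrop, ih rest [] ((cur.reverse) :: acc) (by omega)]
        simp only [pvSplit, if_pos rfl, if_true, pvModHead, List.reverse_cons,
          List.append_assoc, List.reverse_nil, List.nil_append, List.singleton_append]
        cases hps : pvSplit rest with
        | nil => exact absurd hps (pvSplit_ne_nil _)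
        | cons x t => simp
      · have hpre : [','].isPrefixOf (c :: rest) = false := by
          have : (',' == c) = false := by
            simp only [beq_eq_false_iff_ne, ne_eq]
            exact fun hcontra => hc hcontra.symm
          simp [List.isPrefixOf, this]
        rw [if_neg (by simp [hpre])]
        simp only [List.length_cons] at h
        rw [ih rest (c :: cur) acc (by omega)]
        cases hps : pvSplit rest with
        | nil => exact absurd hps (pvSplit_ne_nil _)
        | cons x t => simp [pvSplit, hc, hps, pvModHead]

theorem pv_splitOn_eq (s : List Char) :
    PySem.Chars.splitOn s [','] = pvSplit s := by
  unfold PySem.Chars.splitOn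
  rw [pv_go_eq s.length.succ s [] [] (by omega)]
  simp [pvModHead_nil _ (pvSplit_ne_nil s)]

theorem pv_foldA (cs : List Char) (gen : List Char) :
    cs.foldl (fun gen ch =>
      let gen := if (97 ≤ ch.toNat ∧ ch.toNat ≤ 122) ∨ (65 ≤ ch.toNat ∧ ch.toNat ≤ 90)
                 then gen ++ [ch] else gen
      if ch.toNat = 44 then gen ++ [','] else gen) gen = gen ++ pvKeep cs := by
  induction cs generalizing gen with
  | nil => simp [pvKeep]
  | cons c cs ih =>
    simp only [List.foldl_cons, ih, pvKeep]
    split <;> split <;> simp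

/-- Filtering to letters-or-commas and then splitting on commas is splitting first
    and filtering each segment to letters. -/
theorem pv_split_keep (cs : List Char) :
    pvSplit (pvKeep cs) = (pvSplit cs).map (List.filter pvIsLetter) := by
  induction cs with
  | nil => simp [pvKeep, pvSplit]
  | cons c cs ih =>
    simp only [pvKeep, pvSplit]
    by_cases hl : (97 ≤ c.toNat ∧ c.toNat ≤ 122) ∨ (65 ≤ c.toNat ∧ c.toNat ≤ 90)
    · have hc : c.toNat ≠ 44 := by rcases hl with ⟨h1, h2⟩ | ⟨h1, h2⟩ <;> omega
      have hcc : c ≠ ',' := by intro h; subst h; exact hc rfl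
      have hlet : pvIsLetter c = true := by simp [pvIsLetter, hl]
      rw [if_pos hl, if_neg hc, if_neg hcc]
      simp only [List.append_nil, List.singleton_append, pvSplit, if_neg hcc, ih]
      cases hps : pvSplit cs with
      | nil => exact absurd hps (pvSplit_ne_nil _)
      | cons x t => simp [pvModHead, hps, List.filter, hlet]
    · rw [if_neg hl]
      by_cases hc : c.toNat = 44
      · have hcc : c = ',' := by
          have := Char.ofNat_toNat c; rw [hc] at this; exact this.symm
        subst hcc
        rw [if_pos hc]
        simp [pvSplit, ih]
      · have hcc : c ≠ ',' := by intro h; subst h; exact hc rfl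
        have hlet : pvIsLetter c = false := by simp [pvIsLetter, hl]
        rw [if_neg hc]
        simp only [List.nil_append, pvSplit, if_neg hcc, ih]
        cases hps : pvSplit cs with
        | nil => exact absurd hps (pvSplit_ne_nil _)
        | cons x t => simp [pvModHead, hps, List.filter, hlet]

-- ===== VERDICT (by name: the statement is the Claim_ definition above) =====
theorem findGenre_spec : Claim_equal_findGenre := by
  intro a _
  unfold Spec_findGenre findGenre findGenre_alt
  simp only [pv_foldA a.toList [], List.nil_append, pv_splitOn_eq, pv_split_keep,
    List.map_map]
  rfl
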